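-- pv_equiv track=rewrite | github.com/yedhu438/DesignAutomationprototypeV2 | batch_processor.py | rows_have_same_design
-- ===== SOURCE A (Python) =====
-- def rows_have_same_design(rows):
--     if len(rows) <= 1:
--         return True
--     def sig(row):
--         return (
--             (row.get("FrontText") or "").strip(),
--             (row.get("FrontImageJSON") or "").strip(),
--             (row.get("FrontImage") or "").strip(),
--             (row.get("FrontFonts") or "").strip(),
--             (row.get("FrontColours") or "").strip(),
--         )
--     first = sig(rows[0])
--     return all(sig(r) == first for r in rows)
-- ===== SOURCE B (Python) =====
-- FIELDS = ("FrontText", "FrontImageJSON", "FrontImage", "FrontFonts", "FrontColours")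
--
-- def rows_have_same_design(rows):
--     sigs = {tuple((r.get(f) or "").strip() for f in FIELDS) for r in rows}
--     return len(sigs) <= 1
-- ===== Notes on version B (the rewrite author's own statement) =====
-- stated objective: alternative
-- what changed: Instead of comparing every row's signature tuple against the first row's, B collects the normalized signatures of all rows into a set and returns whether its cardinality is at most 1 (which also subsumes A's len<=1 guard).
import Mathlib
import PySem

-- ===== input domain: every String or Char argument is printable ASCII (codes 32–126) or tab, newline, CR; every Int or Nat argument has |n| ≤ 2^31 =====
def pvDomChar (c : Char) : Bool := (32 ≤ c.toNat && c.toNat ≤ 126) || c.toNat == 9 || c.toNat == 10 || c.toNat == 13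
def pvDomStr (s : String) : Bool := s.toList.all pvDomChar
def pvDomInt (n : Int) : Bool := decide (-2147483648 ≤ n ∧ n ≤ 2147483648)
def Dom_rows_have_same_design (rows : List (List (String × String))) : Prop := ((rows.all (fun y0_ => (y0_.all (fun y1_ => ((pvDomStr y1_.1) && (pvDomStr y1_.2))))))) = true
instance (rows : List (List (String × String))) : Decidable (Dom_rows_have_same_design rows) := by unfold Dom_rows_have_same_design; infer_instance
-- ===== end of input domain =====

-- B replaces A's compare-each-row-against-the-first scheme with a set of the rows'
-- normalized signatures, returning whether its cardinality is at most 1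
-- (objective: alternative; same O(n) cost).

-- ===== PORT A =====
-- (row.get(name) or "").strip(): assoc-list first-match lookup, missing key -> "", then strip
def pvNorm (row : List (String × String)) (name : String) : String :=
  PySem.Str.strip ((row.lookup name).getD "")

def pvSig (row : List (String × String)) : String × String × String × String × String :=
  (pvNorm row "FrontText", pvNorm row "FrontImageJSON", pvNorm row "FrontImage",
   pvNorm row "FrontFonts", pvNorm row "FrontColours")

def rows_have_same_design (rows : List (List (String × String))) : Bool :=
  if rows.length ≤ 1 then true
  else
    match rows with
    | [] => true
    | r0 :: _ => rows.all (fun r => pvSig r == pvSig r0)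

-- ===== PORT B =====
def pvFields : List String :=
  ["FrontText", "FrontImageJSON", "FrontImage", "FrontFonts", "FrontColours"]

-- tuple((r.get(f) or "").strip() for f in FIELDS); the 5-tuple is modelled as its element list
def pvSigB (row : List (String × String)) : List String :=
  pvFields.map (fun f => PySem.Str.strip ((row.lookup f).getD ""))

def rows_have_same_design_alt (rows : List (List (String × String))) : Bool :=
  decide ((PySem.Set.ofList (rows.map pvSigB)).length ≤ 1)

-- ===== PRECONDITION & SPEC =====
def Spec_rows_have_same_design (rows : List (List (String × String))) (out : Bool) : Prop := out = rows_have_same_design_alt rows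
instance (rows : List (List (String × String))) (out : Bool) : Decidable (Spec_rows_have_same_design rows out) := by unfold Spec_rows_have_same_design; infer_instance

-- ===== CLAIM (what is proved, stated in full; the proofs are below) =====
def Claim_equal_rows_have_same_design : Prop := ∀ (rows : List (List (String × String))), Dom_rows_have_same_design rows → Spec_rows_have_same_design rows (rows_have_same_design rows)

-- ===== LEMMAS AND PROOFS =====
lemma pv_add_len {α : Type} [BEq α] (s : List α) (y : α) :
    s.length ≤ (PySem.Set.add s y).length := by
  simp only [PySem.Set.add]; split <;> simp

lemma pv_foldl_add_len {α : Type} [BEq α] (l s : List α) :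
    s.length ≤ (l.foldl PySem.Set.add s).length := by
  induction l generalizing s with
  | nil => simp
  | cons y l ih => exact le_trans (pv_add_len s y) (ih _)

lemma pv_foldl_add_len_le_one {α : Type} [BEq α] [LawfulBEq α] (l : List α) (x : α) :
    decide ((l.foldl PySem.Set.add [x]).length ≤ 1) = l.all (fun y => y == x) := by
  induction l with
  | nil => simp
  | cons y l ih =>
    simp only [List.foldl_cons, List.all_cons]
    by_cases h : y = x
    · subst h
      have hadd : PySem.Set.add [y] y = [y] := by
        simp [PySem.Set.add]
      simp only [hadd, ih]; simp
    · have hadd : PySem.Set.add [x] y = [x, y] := by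
        simp [PySem.Set.add, h]
      simp only [hadd]
      have h2 : 2 ≤ (l.foldl PySem.Set.add [x, y]).length := pv_foldl_add_len l [x, y]
      have hy : (y == x) = false := by simp [h]
      simp [hy]
      omega

lemma pv_sig_beq_eq (r r0 : List (String × String)) :
    (pvSig r == pvSig r0) = (pvSigB r == pvSigB r0) := by
  rw [Bool.eq_iff_iff]
  simp [pvSig, pvSigB, pvNorm, pvFields, Prod.ext_iff]

-- ===== VERDICT (by name: the statement is the Claim_ definition above) =====
theorem rows_have_same_design_spec : Claim_equal_rows_have_same_design := by
  intro rows _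
  unfold Spec_rows_have_same_design rows_have_same_design rows_have_same_design_alt
  match rows with
  | [] => rfl
  | [r] => rfl
  | r0 :: r1 :: rest =>
    have hlen : ¬ (r0 :: r1 :: rest).length ≤ 1 := by simp
    rw [if_neg hlen]
    have hof : PySem.Set.ofList ((r0 :: r1 :: rest).map pvSigB)
        = ((r1 :: rest).map pvSigB).foldl PySem.Set.add [pvSigB r0] := by
      simp only [List.map_cons]
      rfl
    rw [hof, pv_foldl_add_len_le_one]
    simp only [List.all_map, List.all_cons, pv_sig_beq_eq, beq_self_eq_true, Bool.true_and]
    simp only [Function.comp_def]
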